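-- pv_equiv track=rewrite | github.com/flateric94/ptsidm01informatique | dm1 ptsi info.py | decodage_naif
-- ===== SOURCE A (Python) =====
-- def decodage_naif(L):
--     if len(L) % 3 != 0:
--         return (False,[])
--     else:
--         ListeMessages=[]
--         TailleMessage=int(len(L) / 3)
--         Increment=0
--         Message=[]
--
--         for k in range(0,int(len(L))):
--                 Message.append(L[k])
--                 Increment=Increment+1
--                 if Increment==TailleMessage:
--                     ListeMessages.append(Message)
--                     Increment=0
--                     Message=[]
--
--         for k in range(0,int(len(ListeMessages))):
--             if ListeMessages.count(ListeMessages[k]) > 1: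
--                 return (True, ListeMessages[k])
--
--         return (False, [])
-- ===== SOURCE B (Python) =====
-- def decodage_naif(L):
--     n = len(L)
--     if n % 3 != 0 or n == 0:
--         return (False, [])
--     t = n // 3
--     ab = ac = bc = True
--     for i in range(t):
--         x, y, z = L[i], L[i + t], L[i + 2 * t]
--         ab = ab and x == y
--         ac = ac and x == z
--         bc = bc and y == z
--     if ab or ac:
--         return (True, L[:t])
--     if bc:
--         return (True, L[t:2 * t])
--     return (False, [])
-- ===== Notes on version B (the rewrite author's own statement) =====
-- stated objective: alternative
-- what changed: B never materialises the three message chunks: one index pass over positions 0..t-1 compares the three thirds element-wise into three boolean flags, and a slice is produced only for the final answer, replacing A's chunk-building append loop and its count()-based scan over the chunk list.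
import Mathlib
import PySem

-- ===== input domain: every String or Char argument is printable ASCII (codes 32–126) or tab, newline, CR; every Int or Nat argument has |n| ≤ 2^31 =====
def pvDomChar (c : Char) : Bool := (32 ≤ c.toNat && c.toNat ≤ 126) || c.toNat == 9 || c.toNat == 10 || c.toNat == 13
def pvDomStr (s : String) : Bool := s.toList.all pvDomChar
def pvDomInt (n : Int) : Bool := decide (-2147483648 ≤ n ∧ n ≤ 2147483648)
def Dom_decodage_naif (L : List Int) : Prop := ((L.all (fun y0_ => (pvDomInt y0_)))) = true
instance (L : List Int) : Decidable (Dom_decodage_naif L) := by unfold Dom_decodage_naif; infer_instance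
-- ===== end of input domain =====

-- B compares the three thirds element-wise in one index pass with three boolean flags, never
-- building chunk lists; A builds the chunk list by an append loop and scans it with count() (objective: alternative).


-- ===== PORT A =====
-- one step of A's first loop: Message.append(L[k]); Increment += 1; flush when Increment == TailleMessage
def pvStepA (t : Nat) (s : List (List Int) × Nat × List Int) (x : Int) : List (List Int) × Nat × List Int :=
  let msg := s.2.2 ++ [x]
  let inc := s.2.1 + 1
  if inc = t then (s.1 ++ [msg], 0, []) else (s.1, inc, msg)

-- A's second loop: for k in range(len(msgs)): if msgs.count(msgs[k]) > 1: return (True, msgs[k])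
def pvScanA (msgs : List (List Int)) (k : Nat) : Bool × List Int :=
  if h : k < msgs.length then
    if msgs.count msgs[k] > 1 then (true, msgs[k]) else pvScanA msgs (k + 1)
  else (false, [])
termination_by msgs.length - k

def decodage_naif (L : List Int) : Bool × List Int :=
  if L.length % 3 ≠ 0 then (false, [])
  else
    let t := L.length / 3
    let r := L.foldl (pvStepA t) ([], 0, [])
    pvScanA r.1 0

-- ===== PORT B =====
-- the single index pass: three flags, one step per position i (L[i] read with getD; all indices are in range)
def pvFlagsB (L : List Int) (t : Nat) : Bool × Bool × Bool :=
  (List.range t).foldl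
    (fun s i =>
      (s.1 && decide (L.getD i 0 = L.getD (i + t) 0),
       s.2.1 && decide (L.getD i 0 = L.getD (i + 2 * t) 0),
       s.2.2 && decide (L.getD (i + t) 0 = L.getD (i + 2 * t) 0)))
    (true, true, true)

def decodage_naif_alt (L : List Int) : Bool × List Int :=
  let n := L.length
  if n % 3 ≠ 0 ∨ n = 0 then (false, [])
  else
    let t := n / 3
    let f := pvFlagsB L t
    if f.1 ∨ f.2.1 then (true, L.take t)
    else if f.2.2 then (true, (L.drop t).take t)
    else (false, [])

-- ===== PRECONDITION & SPEC =====
def Spec_decodage_naif (L : List Int) (out : Bool × List Int) : Prop := out = decodage_naif_alt L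
instance (L : List Int) (out : Bool × List Int) : Decidable (Spec_decodage_naif L out) := by unfold Spec_decodage_naif; infer_instance

-- ===== CLAIM (what is proved, stated in full; the proofs are below) =====
def Claim_equal_decodage_naif : Prop := ∀ (L : List Int), Dom_decodage_naif L → Spec_decodage_naif L (decodage_naif L)

-- ===== LEMMAS AND PROOFS =====

-- A's first loop fills one chunk: starting with a partial Message, consuming exactly the
-- elements that complete it appends the full chunk and resets the state.
lemma pvStepA_fill (t : Nat) (xs : List Int) : ∀ (msgs : List (List Int)) (msg : List Int),
    msg.length < t → msg.length + xs.length = t →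
    xs.foldl (pvStepA t) (msgs, msg.length, msg) = (msgs ++ [msg ++ xs], 0, []) := by
  induction xs with
  | nil => intro msgs msg h1 h2; simp at h2; omega
  | cons x xs ih =>
    intro msgs msg h1 h2
    simp only [List.foldl_cons]
    by_cases hfin : msg.length + 1 = t
    · have hxs : xs = [] := by
        have : xs.length = 0 := by simp at h2; omega
        exact List.eq_nil_of_length_eq_zero this
      subst hxs
      simp [pvStepA, hfin]
    · have hlen : (msg ++ [x]).length < t := by simp at h2 ⊢; omega
      have hrw : pvStepA t (msgs, msg.length, msg) x = (msgs, (msg ++ [x]).length, msg ++ [x]) := by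
        simp [pvStepA, hfin]
      rw [hrw, ih msgs (msg ++ [x]) hlen (by simp at h2 ⊢; omega)]
      simp

-- three full chunks: the loop over a ++ b ++ c with |a| = |b| = |c| = t > 0 yields [a, b, c]
lemma pvStepA_three (t : Nat) (ht : 0 < t) (a b c : List Int)
    (ha : a.length = t) (hb : b.length = t) (hc : c.length = t) :
    (a ++ b ++ c).foldl (pvStepA t) ([], 0, []) = ([a, b, c], 0, []) := by
  rw [List.foldl_append, List.foldl_append]
  have s1 := pvStepA_fill t a ([] : List (List Int)) [] (by simpa using ht) (by simpa using ha)
  simp only [List.length_nil] at s1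
  rw [s1]
  have s2 := pvStepA_fill t b [([] : List Int) ++ a] [] (by simpa using ht) (by simpa using hb)
  simp only [List.length_nil] at s2
  simp only [List.nil_append] at s1 s2 ⊢
  rw [s2]
  show List.foldl (pvStepA t) ([a, b], 0, []) c = ([a, b, c], 0, [])
  have s3 := pvStepA_fill t c [a, b] [] (by simpa using ht) (by simpa using hc)
  simp only [List.length_nil, List.nil_append] at s3
  rw [s3]
  simp

-- A's count-based scan over exactly three chunks, as ordered comparisons
lemma pvScanA_three (a b c : List Int) :
    pvScanA [a, b, c] 0 =
      if a = b ∨ a = c then (true, a) else if b = c then (true, b) else (false, []) := by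
  by_cases hab : a = b
  · subst hab; rw [pvScanA]; simp [List.count_cons]
  · by_cases hac : a = c
    · subst hac; rw [pvScanA]; simp [hab, Ne.symm hab]
    · by_cases hbc : b = c
      · subst hbc; rw [pvScanA, pvScanA]; simp [hab, Ne.symm hab]
      · rw [pvScanA, pvScanA, pvScanA, pvScanA]
        simp [hab, hac, hbc, Ne.symm hab, Ne.symm hac]

-- a fold of three independent && flags splits componentwise into three `all`s
lemma foldl_and_triple (p q r : Nat → Bool) : ∀ (l : List Nat) (a b c : Bool),
    l.foldl (fun s i => (s.1 && p i, s.2.1 && q i, s.2.2 && r i)) (a, b, c) =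
      (a && l.all p, b && l.all q, c && l.all r) := by
  intro l
  induction l with
  | nil => intro a b c; simp
  | cons x xs ih => intro a b c; simp [ih, Bool.and_assoc]

-- the flag fold splits componentwise into three `all`s over the index range
lemma pvFlagsB_all (L : List Int) (t : Nat) :
    pvFlagsB L t =
      ((List.range t).all (fun i => decide (L.getD i 0 = L.getD (i + t) 0)),
       (List.range t).all (fun i => decide (L.getD i 0 = L.getD (i + 2 * t) 0)),
       (List.range t).all (fun i => decide (L.getD (i + t) 0 = L.getD (i + 2 * t) 0))) := by
  unfold pvFlagsB
  rw [foldl_and_triple]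
  simp

-- pointwise equality of two in-range segments equals equality of the slices
lemma all_eq_slice_eq (L : List Int) (t a b : Nat) (ha : a + t ≤ L.length) (hb : b + t ≤ L.length) :
    ((List.range t).all (fun i => decide (L.getD (i + a) 0 = L.getD (i + b) 0)) = true) ↔
      (L.drop a).take t = (L.drop b).take t := by
  have hla : ((L.drop a).take t).length = t := by simp; omega
  have hlb : ((L.drop b).take t).length = t := by simp; omega
  rw [List.all_eq_true]
  constructor
  · intro h
    apply List.ext_getElem (by omega)
    intro i hi _
    have hit : i < t := by omega
    have := h i (List.mem_range.mpr hit)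
    simp only [decide_eq_true_eq] at this
    have g1 : (L.drop a).take t = (L.drop a).take t := rfl
    simp only [List.getElem_take, List.getElem_drop]
    rw [List.getD_eq_getElem L 0 (by omega), List.getD_eq_getElem L 0 (by omega)] at this
    simpa [Nat.add_comm] using this
  · intro h i hi
    have hit : i < t := List.mem_range.mp hi
    have := congrArg (fun l => l.getD i 0) h
    simp only [List.getD_eq_getElem _ 0 (by omega : i < ((L.drop a).take t).length),
      List.getD_eq_getElem _ 0 (by omega : i < ((L.drop b).take t).length)] at this
    simp only [List.getElem_take, List.getElem_drop] at this
    simp only [decide_eq_true_eq]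
    rw [List.getD_eq_getElem L 0 (by omega), List.getD_eq_getElem L 0 (by omega)]
    simpa [Nat.add_comm] using this

-- ===== VERDICT (by name: the statement is the Claim_ definition above) =====
theorem decodage_naif_spec : Claim_equal_decodage_naif := by
  intro L _
  unfold Spec_decodage_naif decodage_naif decodage_naif_alt
  by_cases hmod : L.length % 3 = 0
  · simp only [hmod, ne_eq, not_true_eq_false, if_false, false_or]
    set t := L.length / 3 with ht
    by_cases ht0 : L.length = 0
    · have hL : L = [] := List.eq_nil_of_length_eq_zero ht0
      subst hL
      simp [pvScanA]
    · have htpos : 0 < t := by omega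
      have hlen : L.length = 3 * t := by omega
      have hdec : L = L.take t ++ ((L.drop t).take t ++ L.drop (2 * t)) := by
        conv_lhs => rw [← List.take_append_drop t L]
        congr 1
        conv_lhs => rw [← List.take_append_drop t (L.drop t)]
        rw [List.drop_drop]
        congr 2
        omega
      have ha : (L.take t).length = t := by simp; omega
      have hb : ((L.drop t).take t).length = t := by simp; omega
      have hc : (L.drop (2 * t)).length = t := by simp; omega
      have hfold : L.foldl (pvStepA t) ([], 0, []) =
          ([L.take t, (L.drop t).take t, L.drop (2 * t)], 0, []) := by
        conv_lhs => rw [hdec]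
        rw [← List.append_assoc]
        exact pvStepA_three t htpos _ _ _ ha hb hc
      simp only [ht0, hfold, if_false]
      rw [pvScanA_three, pvFlagsB_all]
      have e1 := all_eq_slice_eq L t 0 t (by omega) (by omega)
      have e2 := all_eq_slice_eq L t 0 (2 * t) (by omega) (by omega)
      have e3 := all_eq_slice_eq L t t (2 * t) (by omega) (by omega)
      simp only [Nat.add_zero, List.drop_zero] at e1 e2 e3
      have hc' : (L.drop (2 * t)).take t = L.drop (2 * t) := by
        apply List.take_of_length_le; omega
    -- translate each flag into the corresponding slice equality
      rw [hc'] at e2 e3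
      dsimp only
      simp only [e1, e2, e3]
  · simp [hmod]
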